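-- pv_equiv track=rewrite | github.com/ydb-platform/ydb | contrib/restricted/python/ldap3/ldap3/utils/dn.py | _escape_attribute_value
-- ===== SOURCE A (Python) =====
-- from string import hexdigits, ascii_letters, digits
--
-- STATE_ANY = 0
--
-- STATE_ESCAPE = 1
--
-- STATE_ESCAPE_HEX = 2
--
-- def _escape_attribute_value(attribute_value):
--     if not attribute_value:
--         return ''
--
--     if attribute_value[0] == '#':  # with leading SHARP only pairs of hex characters are valid
--         valid_hex = True
--         if len(attribute_value) % 2 == 0:  # string must be # + HEX HEX (an odd number of chars)
--             valid_hex = False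
--
--         if valid_hex:
--             for c in attribute_value:
--                 if c not in hexdigits:  # allowed only hex digits as per RFC 4514
--                     valid_hex = False
--                     break
--
--         if valid_hex:
--             return attribute_value
--
--     state = STATE_ANY
--     escaped = ''
--     tmp_buffer = ''
--     for c in attribute_value:
--         if state == STATE_ANY:
--             if c == '\\':
--                 state = STATE_ESCAPE
--             elif c in '"#+,;<=>\00':
--                 escaped += '\\' + c
--             else:
--                 escaped += c
--         elif state == STATE_ESCAPE:
--             if c in hexdigits:
--                 tmp_buffer = c
--                 state = STATE_ESCAPE_HEX
--             elif c in ' "#+,;<=>\\\00':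
--                 escaped += '\\' + c
--                 state = STATE_ANY
--             else:
--                 escaped += '\\\\' + c
--         elif state == STATE_ESCAPE_HEX:
--             if c in hexdigits:
--                 escaped += '\\' + tmp_buffer + c
--             else:
--                 escaped += '\\\\' + tmp_buffer + c
--             tmp_buffer = ''
--             state = STATE_ANY
--
--     # final state
--     if state == STATE_ESCAPE:
--         escaped += '\\\\'
--     elif state == STATE_ESCAPE_HEX:
--         escaped += '\\\\' + tmp_buffer
--
--     if escaped[0] == ' ':  # leading SPACE must be escaped
--         escaped = '\\' + escaped
--
--     if escaped[-1] == ' ' and len(escaped) > 1 and escaped[-2] != '\\':  # trailing SPACE must be escaped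
--         escaped = escaped[:-1] + '\\ '
--
--     return escaped
-- ===== SOURCE B (Python) =====
-- from string import hexdigits
--
-- def _escape_attribute_value(attribute_value):
--     if not attribute_value:
--         return ''
--     s = attribute_value
--     if s[0] == '#' and len(s) % 2 == 1 and all(c in hexdigits for c in s):
--         return s  # leading '#' with valid hex pairs: returned untouched
--
--     parts = []
--     i = 0
--     n = len(s)
--     while i < n:
--         c = s[i]
--         if c != '\\':
--             parts.append('\\' + c if c in '"#+,;<=>\00' else c)
--             i += 1
--             continue
--         # backslash group: scan forward until it resolves (or input ends)
--         i += 1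
--         while i < n:
--             c = s[i]
--             if c in hexdigits:
--                 if i + 1 < n:
--                     d = s[i + 1]
--                     parts.append(('\\' + c + d) if d in hexdigits else ('\\\\' + c + d))
--                     i += 2
--                 else:
--                     parts.append('\\\\' + c)
--                     i += 1
--                 break
--             elif c in ' "#+,;<=>\\\00':
--                 parts.append('\\' + c)
--                 i += 1
--                 break
--             else:
--                 parts.append('\\\\' + c)
--                 i += 1
--         else:
--             parts.append('\\\\')
--
--     escaped = ''.join(parts)
--
--     if escaped[0] == ' ':
--         escaped = '\\' + escaped
--     if escaped[-1] == ' ' and len(escaped) > 1 and escaped[-2] != '\\':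
--         escaped = escaped[:-1] + '\\ '
--     return escaped
-- ===== Notes on version B (the rewrite author's own statement) =====
-- stated objective: alternative
-- what changed: Replaces the STATE_ANY/STATE_ESCAPE/STATE_ESCAPE_HEX state machine (fold with an explicit state variable and tmp buffer) by an index loop with lookahead: each backslash group is consumed in an inner scan that emits its pieces directly, and the output is joined from a list of pieces instead of repeated string concatenation.
import Mathlib
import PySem

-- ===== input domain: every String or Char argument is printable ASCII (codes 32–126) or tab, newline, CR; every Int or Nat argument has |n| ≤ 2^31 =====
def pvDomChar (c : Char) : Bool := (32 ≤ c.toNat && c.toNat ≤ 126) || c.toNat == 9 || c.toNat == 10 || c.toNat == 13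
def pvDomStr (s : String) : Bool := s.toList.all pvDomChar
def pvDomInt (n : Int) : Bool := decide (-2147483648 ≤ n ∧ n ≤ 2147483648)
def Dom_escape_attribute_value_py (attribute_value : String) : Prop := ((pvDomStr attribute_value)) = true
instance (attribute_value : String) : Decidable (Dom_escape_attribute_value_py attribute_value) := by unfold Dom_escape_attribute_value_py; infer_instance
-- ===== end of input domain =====

-- B rewrites A's three-state escape machine as an index loop with lookahead that joins a
-- list of emitted pieces; same return value on every input (alternative decomposition, not faster).
-- Strings are handled as List Char throughout (Python str ops are exact on this ASCII domain).

-- ===== PORT A =====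
-- string.hexdigits
def pvHexChars : List Char :=
  ['0','1','2','3','4','5','6','7','8','9','a','b','c','d','e','f','A','B','C','D','E','F']
-- '"#+,;<=>\00'
def pvSpecAny : List Char := ['"','#','+',',',';','<','=','>','\x00']
-- ' "#+,;<=>\\\00'
def pvSpecEsc : List Char := [' ','"','#','+',',',';','<','=','>','\\','\x00']

-- the hex-validity for-loop with break (valid_hex flag)
def pvHexLoopA : List Char → Bool
  | [] => true
  | c :: rest => if !(pvHexChars.contains c) then false else pvHexLoopA rest

-- one step of the STATE_ANY/STATE_ESCAPE/STATE_ESCAPE_HEX machine: (state, escaped, tmp_buffer)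
def pvStepA (st : Int × List Char × List Char) (c : Char) : Int × List Char × List Char :=
  let (state, escaped, tmp) := st
  if state == 0 then
    if c == '\\' then (1, escaped, tmp)
    else if pvSpecAny.contains c then (0, escaped ++ ['\\', c], tmp)
    else (0, escaped ++ [c], tmp)
  else if state == 1 then
    if pvHexChars.contains c then (2, escaped, [c])
    else if pvSpecEsc.contains c then (0, escaped ++ ['\\', c], tmp)
    else (1, escaped ++ ['\\', '\\', c], tmp)   -- Python does not reset state here
  else
    if pvHexChars.contains c then (0, escaped ++ ['\\'] ++ tmp ++ [c], [])
    else (0, escaped ++ ['\\', '\\'] ++ tmp ++ [c], [])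

-- the '# final state' block
def pvFinishA (st : Int × List Char × List Char) : List Char :=
  if st.1 == 1 then st.2.1 ++ ['\\', '\\']
  else if st.1 == 2 then st.2.1 ++ ['\\', '\\'] ++ st.2.2
  else st.2.1

-- leading-SPACE and trailing-SPACE fixups
def pvFixupA (escaped : List Char) : List Char :=
  let escaped := if PySem.List.pyGet? escaped 0 == some ' ' then '\\' :: escaped else escaped
  if PySem.List.pyGet? escaped (-1) == some ' ' && decide (1 < escaped.length)
      && !(PySem.List.pyGet? escaped (-2) == some '\\') then
    PySem.List.slice escaped none (some (-1)) ++ ['\\', ' ']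
  else escaped

def escape_attribute_value_py (attribute_value : String) : String :=
  let cs := attribute_value.toList
  if cs = [] then "" else
  if PySem.List.pyGet? cs 0 == some '#' then
    let valid1 : Bool := !(cs.length % 2 == 0)
    let valid2 : Bool := if valid1 then pvHexLoopA cs else valid1
    if valid2 then attribute_value
    else String.ofList (pvFixupA (pvFinishA (cs.foldl pvStepA (0, [], []))))
  else String.ofList (pvFixupA (pvFinishA (cs.foldl pvStepA (0, [], []))))

-- ===== PORT B =====
mutual
-- outer 'while i < n' loop, emitting pieces
def pvGoB : List Char → List (List Char)
  | [] => []
  | c :: rest =>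
    if c != '\\' then
      (if pvSpecAny.contains c then ['\\', c] else [c]) :: pvGoB rest
    else pvEscB rest
  termination_by structural cs => cs
-- inner scan of a backslash group (while … else)
def pvEscB : List Char → List (List Char)
  | [] => [['\\', '\\']]
  | c :: rest =>
    if pvHexChars.contains c then
      match rest with
      | d :: rest' =>
        (if pvHexChars.contains d then ['\\', c, d] else ['\\', '\\', c, d]) :: pvGoB rest'
      | [] => [['\\', '\\', c]]
    else if pvSpecEsc.contains c then ['\\', c] :: pvGoB rest
    else ['\\', '\\', c] :: pvEscB rest
  termination_by structural cs => cs
end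

def pvFixupB (escaped : List Char) : List Char :=
  let escaped := if PySem.List.pyGet? escaped 0 == some ' ' then '\\' :: escaped else escaped
  if PySem.List.pyGet? escaped (-1) == some ' ' && decide (1 < escaped.length)
      && !(PySem.List.pyGet? escaped (-2) == some '\\') then
    PySem.List.slice escaped none (some (-1)) ++ ['\\', ' ']
  else escaped

def escape_attribute_value_py_alt (attribute_value : String) : String :=
  let cs := attribute_value.toList
  if cs = [] then "" else
  if (PySem.List.pyGet? cs 0 == some '#') && (cs.length % 2 == 1)
      && cs.all (pvHexChars.contains ·) then attribute_value
  else String.ofList (pvFixupB ((pvGoB cs).flatten))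

-- ===== PRECONDITION & SPEC =====
def Spec_escape_attribute_value_py (attribute_value : String) (out : String) : Prop := out = escape_attribute_value_py_alt attribute_value
instance (attribute_value : String) (out : String) : Decidable (Spec_escape_attribute_value_py attribute_value out) := by unfold Spec_escape_attribute_value_py; infer_instance

-- ===== CLAIM (what is proved, stated in full; the proofs are below) =====
def Claim_equal_escape_attribute_value_py : Prop := ∀ (attribute_value : String), Dom_escape_attribute_value_py attribute_value → Spec_escape_attribute_value_py attribute_value (escape_attribute_value_py attribute_value)

-- ===== LEMMAS AND PROOFS =====

lemma pvHexLoopA_eq_all (cs : List Char) : pvHexLoopA cs = cs.all (pvHexChars.contains ·) := by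
  induction cs with
  | nil => rfl
  | cons c rest ih => simp [pvHexLoopA, ih]

-- what state 2 (tmp = [h]) produces, in B's vocabulary
def pvHexTailB (h : Char) : List Char → List Char
  | [] => ['\\', '\\', h]
  | d :: rest =>
    (if pvHexChars.contains d then ['\\', h, d] else ['\\', '\\', h, d]) ++ (pvGoB rest).flatten

lemma pvMachine_eq (cs : List Char) :
    (∀ esc tmp, pvFinishA (cs.foldl pvStepA (0, esc, tmp)) = esc ++ (pvGoB cs).flatten)
    ∧ (∀ esc tmp, pvFinishA (cs.foldl pvStepA (1, esc, tmp)) = esc ++ (pvEscB cs).flatten)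
    ∧ (∀ esc h, pvFinishA (cs.foldl pvStepA (2, esc, [h])) = esc ++ pvHexTailB h cs) := by
  induction cs with
  | nil =>
    refine ⟨fun esc t => ?_, fun esc t => ?_, fun esc h => ?_⟩
    · simp [pvFinishA, pvGoB]
    · have hr : pvEscB ([] : List Char) = [['\\', '\\']] := by rw [pvEscB.eq_def]
      simp [pvFinishA, hr]
    · simp [pvFinishA, pvHexTailB]
  | cons c rest ih =>
    obtain ⟨ih0, ih1, ih2⟩ := ih
    refine ⟨fun esc tmp => ?_, fun esc tmp => ?_, fun esc h => ?_⟩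
    · by_cases hb : c = '\\'
      · have hr : pvGoB (c :: rest) = pvEscB rest := by rw [pvGoB.eq_def]; simp [hb]
        rw [hr]
        simp only [List.foldl_cons]
        rw [show pvStepA (0, esc, tmp) c = (1, esc, tmp) from by simp [pvStepA, hb]]
        exact ih1 esc tmp
      · have hr : pvGoB (c :: rest)
            = (if pvSpecAny.contains c then ['\\', c] else [c]) :: pvGoB rest := by
          rw [pvGoB.eq_def]; simp [hb]
        rw [hr]
        by_cases hs : c ∈ pvSpecAny <;>
          simp [pvStepA, hb, hs, ih0]
    · by_cases hh : c ∈ pvHexChars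
      · cases rest with
        | nil =>
          have hr : pvEscB [c] = [['\\', '\\', c]] := by rw [pvEscB.eq_def]; simp [hh]
          rw [hr]
          simp [pvStepA, hh, pvFinishA]
        | cons d rest' =>
          have hr : pvEscB (c :: d :: rest')
              = (if pvHexChars.contains d then ['\\', c, d] else ['\\', '\\', c, d])
                  :: pvGoB rest' := by
            rw [pvEscB.eq_def]; simp [hh]
          rw [hr]
          simp only [List.foldl_cons]
          rw [show pvStepA (1, esc, tmp) c = (2, esc, [c]) from by simp [pvStepA, hh]]
          have := ih2 esc c
          by_cases hd : d ∈ pvHexChars <;>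
            simpa [pvHexTailB, hd] using this
      · by_cases hs : c ∈ pvSpecEsc
        · have hr : pvEscB (c :: rest) = ['\\', c] :: pvGoB rest := by
            rw [pvEscB.eq_def]; simp [hh, hs]
          rw [hr]
          simp [pvStepA, hh, hs, ih0]
        · have hr : pvEscB (c :: rest) = ['\\', '\\', c] :: pvEscB rest := by
            rw [pvEscB.eq_def]; simp [hh, hs]
          rw [hr]
          simp [pvStepA, hh, hs, ih1]
    · by_cases hh : c ∈ pvHexChars <;>
        simp [pvStepA, pvHexTailB, hh, ih0]

-- ===== VERDICT (by name: the statement is the Claim_ definition above) =====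
theorem escape_attribute_value_py_spec : Claim_equal_escape_attribute_value_py := by
  intro s _
  unfold Spec_escape_attribute_value_py escape_attribute_value_py escape_attribute_value_py_alt
  set cs := s.toList with hcs
  by_cases hnil : cs = []
  · simp [hnil]
  · simp only [hnil, if_false]
    have hcore : pvFixupA (pvFinishA (cs.foldl pvStepA (0, [], []))) = pvFixupB ((pvGoB cs).flatten) := by
      have h := (pvMachine_eq cs).1 [] []
      rw [h]; rfl
    by_cases hsharp : (PySem.List.pyGet? cs 0 == some '#') = true
    · have hv1 : (!(cs.length % 2 == 0)) = (cs.length % 2 == 1) := by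
        rcases Nat.mod_two_eq_zero_or_one cs.length with h | h <;> simp [h]
      by_cases hodd : (cs.length % 2 == 1) = true
      · simp [hsharp, hv1, hodd, pvHexLoopA_eq_all]
        split_ifs with h
        · rfl
        · simp [hcore]
      · simp [hsharp, hv1, hodd, hcore]
    · simp [hsharp, hcore]
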